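-- pv_equiv track=rewrite | github.com/jacklid3-blip/jacklid3-blip.github.io | extra code/Practical_2.py | remove_two_lowest
-- ===== SOURCE A (Python) =====
-- def remove_two_lowest(input_list):
--     if len(input_list) <= 2:
--         return []
--     return_list = input_list.copy()
--     for _ in range(2):
--         lowest_value = min(return_list)
--         return_list.remove(lowest_value)
--     return return_list
-- ===== SOURCE B (Python) =====
-- def remove_two_lowest(input_list):
--     if len(input_list) <= 2:
--         return []
--     a, b = sorted(input_list)[:2]
--     out = []
--     removed_a = False
--     removed_b = False
--     for v in input_list:
--         if v == a and not removed_a: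
--             removed_a = True
--         elif v == b and not removed_b:
--             removed_b = True
--         else:
--             out.append(v)
--     return out
-- ===== Notes on version B (the rewrite author's own statement) =====
-- stated objective: alternative
-- what changed: Instead of two min+remove passes that mutate a copy, B sorts once to name the two smallest values and then builds the result in a single scan that skips the first occurrence of each.
import Mathlib
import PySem

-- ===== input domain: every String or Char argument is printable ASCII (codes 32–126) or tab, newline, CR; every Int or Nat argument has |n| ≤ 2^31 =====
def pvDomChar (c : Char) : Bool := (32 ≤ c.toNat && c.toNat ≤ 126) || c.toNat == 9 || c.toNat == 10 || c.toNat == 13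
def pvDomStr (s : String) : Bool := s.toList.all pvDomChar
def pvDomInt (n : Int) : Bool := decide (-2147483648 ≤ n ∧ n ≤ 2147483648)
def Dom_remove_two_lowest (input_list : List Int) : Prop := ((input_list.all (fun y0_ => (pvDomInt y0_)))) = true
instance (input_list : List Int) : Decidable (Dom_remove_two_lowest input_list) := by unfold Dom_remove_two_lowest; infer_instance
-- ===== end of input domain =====

-- B replaces A's two min+remove passes by one sort naming the two smallest values plus one
-- scan that skips the first occurrence of each (objective: alternative; return value only).

-- ===== PORT A =====
-- one iteration of A's loop body: lowest_value = min(return_list); return_list.remove(lowest_value)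
-- (the `none` branches are unreachable: the guard keeps the list nonempty and min is a member)
def rtlPass (rl : List Int) : List Int :=
  match PySem.List.min? rl (fun x => x) with
  | none => rl
  | some m =>
    match PySem.List.remove? rl m with
    | none => rl
    | some rl' => rl'

def remove_two_lowest (input_list : List Int) : List Int :=
  if input_list.length ≤ 2 then []
  else
    (PySem.List.pyRange 0 2 1).foldl (fun rl _ => rtlPass rl) input_list

-- ===== PORT B =====
-- the body of B's for-loop, state (out, removed_a, removed_b)
def rtlScanStep (a b : Int) (st : List Int × Bool × Bool) (v : Int) : List Int × Bool × Bool :=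
  if v == a && !st.2.1 then (st.1, true, st.2.2)
  else if v == b && !st.2.2 then (st.1, st.2.1, true)
  else (st.1 ++ [v], st.2.1, st.2.2)

def remove_two_lowest_alt (input_list : List Int) : List Int :=
  if input_list.length ≤ 2 then []
  else
    match PySem.List.sorted input_list (fun x => x) false with
    | a :: b :: _ =>
      (input_list.foldl (rtlScanStep a b) ([], false, false)).1
    | _ => []  -- unreachable: sorted keeps the length, which is ≥ 3 here

-- ===== PRECONDITION & SPEC =====
def Spec_remove_two_lowest (input_list : List Int) (out : List Int) : Prop := out = remove_two_lowest_alt input_list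
instance (input_list : List Int) (out : List Int) : Decidable (Spec_remove_two_lowest input_list out) := by unfold Spec_remove_two_lowest; infer_instance

-- ===== CLAIM (what is proved, stated in full; the proofs are below) =====
def Claim_equal_remove_two_lowest : Prop := ∀ (input_list : List Int), Dom_remove_two_lowest input_list → Spec_remove_two_lowest input_list (remove_two_lowest input_list)

-- ===== LEMMAS AND PROOFS =====

-- A-side: one pass removes the first occurrence of the head of the sorted list
theorem rtlPass_eq (xs : List Int) (a : Int) (t : List Int)
    (hs : PySem.List.sorted xs (fun x => x) false = a :: t) :
    rtlPass xs = xs.erase a := by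
  have ha : a ∈ xs := by
    have : a ∈ PySem.List.sorted xs (fun x => x) false := by rw [hs]; exact List.mem_cons_self
    rwa [PySem.List.mem_sorted] at this
  have hxs : xs ≠ [] := by intro h; subst h; rw [show PySem.List.sorted ([] : List Int) (fun x => x) false = [] from rfl] at hs; simp at hs
  obtain ⟨m, hm⟩ : ∃ m, PySem.List.min? xs (fun x => x) = some m := by
    cases h : PySem.List.min? xs (fun x => x) with
    | none => exact absurd ((PySem.List.min?_eq_none_iff _ _).mp h) hxs
    | some m => exact ⟨m, rfl⟩
  have hma : m = a := by
    have h1 : m ≤ a := PySem.List.min?_isMin hm a ha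
    have h2 : a ≤ m := PySem.List.key_head_sorted_le _ _ hs m (PySem.List.min?_mem hm)
    omega
  subst hma
  simp [rtlPass, hm, PySem.List.remove?_eq_some_erase _ _ ha]

-- B-side scan lemmas: the fold with both flags set copies the rest …
theorem rtlScan_tt (a b : Int) : ∀ (xs out : List Int),
    (xs.foldl (rtlScanStep a b) (out, true, true)).1 = out ++ xs := by
  intro xs
  induction xs with
  | nil => simp
  | cons v t ih => intro out; simp [rtlScanStep, ih]

-- … with only removed_a set it still erases the first b …
theorem rtlScan_tf (a b : Int) : ∀ (xs out : List Int),
    (xs.foldl (rtlScanStep a b) (out, true, false)).1 = out ++ xs.erase b := by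
  intro xs
  induction xs with
  | nil => simp
  | cons v t ih =>
    intro out
    by_cases hvb : v = b
    · subst hvb; simp [rtlScanStep, rtlScan_tt]
    · simp [rtlScanStep, hvb, ih]

-- … with only removed_b set it erases the first a …
theorem rtlScan_ft (a b : Int) : ∀ (xs out : List Int),
    (xs.foldl (rtlScanStep a b) (out, false, true)).1 = out ++ xs.erase a := by
  intro xs
  induction xs with
  | nil => simp
  | cons v t ih =>
    intro out
    by_cases hva : v = a
    · subst hva; simp [rtlScanStep, rtlScan_tt]
    · simp [rtlScanStep, hva, ih]

-- … and from the initial state it erases the first a and then the first b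
theorem rtlScan_ff (a b : Int) : ∀ (xs out : List Int),
    (xs.foldl (rtlScanStep a b) (out, false, false)).1 = out ++ (xs.erase a).erase b := by
  intro xs
  induction xs with
  | nil => simp
  | cons v t ih =>
    intro out
    by_cases hva : v = a
    · subst hva; simp [rtlScanStep, rtlScan_tf]
    · by_cases hvb : v = b
      · subst hvb
        simp [rtlScanStep, hva, rtlScan_ft]
      · simp [rtlScanStep, hva, hvb, ih]

-- the sorted list of xs minus its first element sorts xs.erase (head)
theorem sorted_erase_head (xs : List Int) (a : Int) (t : List Int)
    (hs : PySem.List.sorted xs (fun x => x) false = a :: t) :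
    PySem.List.sorted (xs.erase a) (fun x => x) false = t := by
  have hperm : xs.Perm (a :: t) := by
    have := PySem.List.sorted_perm xs (fun x => x) false
    rw [hs] at this; exact this.symm
  have hperm' : (xs.erase a).Perm t := by
    have := hperm.erase a
    simpa [List.erase_cons] using this
  have hpw : (a :: t).Pairwise (fun x y => x ≤ y) := by
    have := PySem.List.sorted_pairwise xs (fun x => x)
    rw [hs] at this; exact this
  exact PySem.List.sorted_id_eq_of_perm_of_pairwise _ _ hperm'.symm (List.Pairwise.of_cons hpw)

-- ===== VERDICT (by name: the statement is the Claim_ definition above) =====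
theorem remove_two_lowest_spec : Claim_equal_remove_two_lowest := by
  intro xs _
  unfold Spec_remove_two_lowest remove_two_lowest remove_two_lowest_alt
  by_cases hlen : xs.length ≤ 2
  · simp [hlen]
  · simp only [hlen, if_false]
    have hlen3 : 3 ≤ (PySem.List.sorted xs (fun x => x) false).length := by
      rw [PySem.List.length_sorted]; omega
    obtain ⟨a, b, rest, hs⟩ : ∃ a b rest,
        PySem.List.sorted xs (fun x => x) false = a :: b :: rest := by
      match h : PySem.List.sorted xs (fun x => x) false with
      | [] => rw [h] at hlen3; simp at hlen3
      | [a] => rw [h] at hlen3; simp at hlen3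
      | a :: b :: rest => exact ⟨a, b, rest, rfl⟩
    rw [hs]
    have hr : PySem.List.pyRange 0 2 1 = [0, 1] := by decide
    rw [hr]
    simp only [List.foldl]
    rw [rtlPass_eq xs a (b :: rest) hs,
        rtlPass_eq (xs.erase a) b rest (sorted_erase_head xs a (b :: rest) hs),
        rtlScan_ff]
    simp
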